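-- pv_equiv track=rewrite | github.com/mjs375/Portfolio | 6kyu/ConsecutiveCount.py | get_consective_items
-- ===== SOURCE A (Python) =====
-- def get_consective_items(items, key):
--     count, segments = 0, []
--     for c in str(items):
--         if c == str(key):
--             count += 1
--         else:
--             segments.append(count)
--             count = 0
--     segments.append(count)
--     #
--     return max(segments)
-- ===== SOURCE B (Python) =====
-- from itertools import groupby
--
-- def get_consective_items(items, key):
--     k = str(key)
--     return max((len(list(grp)) for ch, grp in groupby(str(items)) if ch == k), default=0)
-- ===== Notes on version B (the rewrite author's own statement) =====
-- stated objective: idiomatic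
-- what changed: Replaces A's manual count/segments accumulator loop with itertools.groupby: split str(items) into maximal runs and take max(run length for runs of str(key), default=0).
import Mathlib
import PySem

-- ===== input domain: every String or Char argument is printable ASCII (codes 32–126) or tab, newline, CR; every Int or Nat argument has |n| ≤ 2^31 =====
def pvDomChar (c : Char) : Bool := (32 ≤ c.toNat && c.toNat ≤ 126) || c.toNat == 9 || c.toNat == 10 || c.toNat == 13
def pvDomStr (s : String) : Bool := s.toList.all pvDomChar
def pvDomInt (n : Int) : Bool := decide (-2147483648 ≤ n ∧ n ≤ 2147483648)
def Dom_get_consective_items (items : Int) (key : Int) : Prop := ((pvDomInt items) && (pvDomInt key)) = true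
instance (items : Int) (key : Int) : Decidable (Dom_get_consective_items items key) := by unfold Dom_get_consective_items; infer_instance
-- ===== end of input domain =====

-- B replaces A's manual count/segments accumulator by splitting str(items) into maximal
-- runs (itertools.groupby) and taking the max length over the runs of str(key) (idiomatic).

-- ===== PORT A =====
-- the loop: for c in str(items): if c == str(key) then count += 1 else append count, reset
def pvALoop (k : List Char) : List Char → Int → List Int → Int × List Int
  | [], count, segments => (count, segments)
  | c :: rest, count, segments =>
      if [c] = k then pvALoop k rest (count + 1) segments
      else pvALoop k rest 0 (segments ++ [count])

-- max(segments): segments is nonempty (count is always appended), so .getD 0 never fires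
def get_consective_items (items : Int) (key : Int) : Int :=
  (PySem.List.max? ((pvALoop (PySem.Int.toChars key) (PySem.Int.toChars items) 0 []).2
      ++ [(pvALoop (PySem.Int.toChars key) (PySem.Int.toChars items) 0 []).1])
    (fun x => x)).getD 0

-- ===== PORT B =====
-- itertools.groupby(s): list of (char, run length) for the maximal runs of s
def pvRuns : List Char → List (Char × Nat)
  | [] => []
  | c :: rest =>
      (c, (rest.takeWhile (· == c)).length + 1) :: pvRuns (rest.dropWhile (· == c))
  termination_by l => l.length
  decreasing_by
    have := List.length_dropWhile_le (· == c) rest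
    simp only [List.length_cons]; omega

-- max((len of run for runs whose char == str(key)), default=0)
def get_consective_items_alt (items : Int) (key : Int) : Int :=
  PySem.List.maxD
    ((pvRuns (PySem.Int.toChars items)).filterMap
      (fun p => if [p.1] = PySem.Int.toChars key then some ((p.2 : Int)) else none))
    (fun x => x) 0

-- ===== PRECONDITION & SPEC =====
def Spec_get_consective_items (items : Int) (key : Int) (out : Int) : Prop := out = get_consective_items_alt items key
instance (items : Int) (key : Int) (out : Int) : Decidable (Spec_get_consective_items items key out) := by unfold Spec_get_consective_items; infer_instance

-- ===== CLAIM (what is proved, stated in full; the proofs are below) =====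
def Claim_equal_get_consective_items : Prop := ∀ (items : Int) (key : Int), Dom_get_consective_items items key → Spec_get_consective_items items key (get_consective_items items key)

-- ===== LEMMAS AND PROOFS =====

-- the list of segments A's loop produces, starting from count c (proof-side spec of A's loop)
def pvSegs (k : List Char) : List Char → Int → List Int
  | [], c => [c]
  | ch :: rest, c => if [ch] = k then pvSegs k rest (c + 1) else c :: pvSegs k rest 0

-- the list B maximises over
def pvLens (k : List Char) (L : List Char) : List Int :=
  (pvRuns L).filterMap (fun p => if [p.1] = k then some ((p.2 : Int)) else none)

theorem pvALoop_spec (k : List Char) (L : List Char) : ∀ (c : Int) (segs : List Int),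
    ((pvALoop k L c segs).2 ++ [(pvALoop k L c segs).1]) = segs ++ pvSegs k L c := by
  induction L with
  | nil => intro c segs; simp [pvALoop, pvSegs]
  | cons ch rest ih =>
      intro c segs
      simp only [pvALoop, pvSegs]
      by_cases h : [ch] = k
      · simp [h, ih]
      · simp [h, ih]

theorem pvMax?_cons : ∀ (l : List Int) (a : Int),
    PySem.List.max? (a :: l) (fun x => x) = some (l.foldl max a) := by
  intro l
  induction l with
  | nil => intro a; rfl
  | cons x t ih =>
      intro a
      have hstep : PySem.List.max? (a :: x :: t) (fun x => x)
          = PySem.List.max? (max a x :: t) (fun x => x) := by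
        simp only [PySem.List.max?, List.foldl_cons]
        congr 1
        show (if a < x then some x else some a) = some (max a x)
        split <;> simp only [Option.some.injEq] <;> omega
      rw [hstep, ih, List.foldl_cons]

theorem pvMaxD0 (l : List Int) (h : ∀ x ∈ l, 0 ≤ x) :
    (PySem.List.max? l (fun x => x)).getD 0 = l.foldl max 0 := by
  cases l with
  | nil => rfl
  | cons a t =>
      rw [pvMax?_cons]
      have ha : max 0 a = a := by have := h a (by simp); omega
      simp [List.foldl_cons, ha]

theorem pvFoldlMax_pull (l : List Int) : ∀ (a b : Int),
    l.foldl max (max a b) = max a (l.foldl max b) := by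
  induction l with
  | nil => intro a b; rfl
  | cons x t ih =>
      intro a b
      simp only [List.foldl_cons, max_assoc, ih]

theorem pvSegs_nonneg (k : List Char) (L : List Char) : ∀ (c : Int), 0 ≤ c →
    ∀ x ∈ pvSegs k L c, 0 ≤ x := by
  induction L with
  | nil => intro c hc x hx; simp [pvSegs] at hx; omega
  | cons ch rest ih =>
      intro c hc x hx
      simp only [pvSegs] at hx
      by_cases h : [ch] = k
      · rw [if_pos h] at hx; exact ih (c + 1) (by omega) x hx
      · rw [if_neg h] at hx
        rcases List.mem_cons.mp hx with rfl | hx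
        · exact hc
        · exact ih 0 le_rfl x hx

theorem pvLens_nonneg (k : List Char) (L : List Char) : ∀ x ∈ pvLens k L, 0 ≤ x := by
  intro x hx
  simp only [pvLens, List.mem_filterMap] at hx
  obtain ⟨p, -, hp⟩ := hx
  by_cases h : [p.1] = k
  · rw [if_pos h] at hp; cases hp; positivity
  · rw [if_neg h] at hp; cases hp

-- matching run: pvSegs just accumulates the count across it
theorem pvSegs_run_match (k : List Char) (t : List Char) (d : List Char)
    (ht : ∀ x ∈ t, [x] = k) : ∀ (c : Int),
    pvSegs k (t ++ d) c = pvSegs k d (c + t.length) := by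
  induction t with
  | nil => intro c; simp
  | cons x t' ih =>
      intro c
      have hx : [x] = k := ht x (by simp)
      have ht' : ∀ y ∈ t', [y] = k := fun y hy => ht y (by simp [hy])
      simp only [List.cons_append, pvSegs, if_pos hx, ih ht']
      congr 1
      simp only [List.length_cons]
      push_cast
      omega

-- non-matching run: pvSegs emits zeros there, invisible to the running max
theorem pvSegs_run_skip (k : List Char) (t : List Char) (d : List Char)
    (ht : ∀ x ∈ t, ¬([x] = k)) : ∀ (m : Int), 0 ≤ m →
    (pvSegs k (t ++ d) 0).foldl max m = (pvSegs k d 0).foldl max m := by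
  induction t with
  | nil => intro m _; rfl
  | cons x t' ih =>
      intro m hm
      have hx : ¬([x] = k) := ht x (by simp)
      have ht' : ∀ y ∈ t', ¬([y] = k) := fun y hy => ht y (by simp [hy])
      have hmz : max m 0 = m := by omega
      simp only [List.cons_append, pvSegs, if_neg hx, List.foldl_cons, hmz]
      exact ih ht' m hm

theorem pvMain (k : List Char) : ∀ (n : Nat) (L : List Char) (c : Int), L.length ≤ n → 0 ≤ c →
    (c = 0 ∨ ∀ y, L.head? = some y → ¬([y] = k)) →
    (pvSegs k L c).foldl max 0 = max c ((pvLens k L).foldl max 0) := by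
  intro n
  induction n with
  | zero =>
      intro L c hL hc _
      have : L = [] := List.eq_nil_of_length_eq_zero (by omega)
      subst this
      simp [pvSegs, pvLens, pvRuns]
      omega
  | succ n ih =>
      intro L c hL hc hhead
      cases L with
      | nil => simp [pvSegs, pvLens, pvRuns]; omega
      | cons ch rest =>
          set t := rest.takeWhile (· == ch) with hts
          set d := rest.dropWhile (· == ch) with hds
          have hsplit : t ++ d = rest := List.takeWhile_append_dropWhile
          have htch : ∀ x ∈ t, x = ch := by
            intro x hx
            have := List.mem_takeWhile_imp hx
            simpa using this
          have hdlen : d.length ≤ n := by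
            have h1 := List.length_dropWhile_le (· == ch) rest
            rw [← hds] at h1
            simp only [List.length_cons] at hL
            omega
          have hdhead : ∀ y, d.head? = some y → y ≠ ch := by
            intro y hy
            have := List.head?_dropWhile_not (· == ch) rest
            rw [← hds, hy] at this
            simpa using this
          have hruns : pvRuns (ch :: rest) = (ch, t.length + 1) :: pvRuns d := by
            rw [pvRuns]
          by_cases h : [ch] = k
          · -- run of the key character
            have hc0 : c = 0 := by
              rcases hhead with rfl | hh
              · rfl
              · exact absurd h (hh ch rfl)
            subst hc0
            have htk : ∀ x ∈ t, [x] = k := by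
              intro x hx; rw [htch x hx]; exact h
            have hdk : ∀ y, d.head? = some y → ¬([y] = k) := by
              intro y hy hyk
              exact hdhead y hy (by
                have : ([y] : List Char) = [ch] := hyk.trans h.symm
                simpa using this)
            have hstep : pvSegs k (ch :: rest) 0 = pvSegs k d (1 + t.length) := by
              simp only [pvSegs, if_pos h]
              rw [← hsplit, pvSegs_run_match k t d htk]
              congr 1
            have hIH := ih d (1 + (t.length : Int)) hdlen (by positivity) (Or.inr hdk)
            rw [hstep]
            have hlenL : pvLens k (ch :: rest) = ((t.length : Int) + 1) :: pvLens k d := by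
              simp [pvLens, hruns, if_pos h]
            rw [hlenL]
            have hfold : (((t.length : Int) + 1) :: pvLens k d).foldl max 0
                = max ((t.length : Int) + 1) ((pvLens k d).foldl max 0) := by
              have h01 : max (0 : Int) ((t.length : Int) + 1) = max ((t.length : Int) + 1) 0 := by omega
              simp only [List.foldl_cons, h01, pvFoldlMax_pull]
            rw [hfold, hIH]
            have hnn := (PySem.List.le_foldl_max (pvLens k d) 0).1
            omega
          · -- run of a non-key character: contributes only zeros / is filtered out
            have htk : ∀ x ∈ t, ¬([x] = k) := by
              intro x hx; rw [htch x hx]; exact h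
            have hstep : (pvSegs k (ch :: rest) c).foldl max 0
                = max c ((pvSegs k d 0).foldl max 0) := by
              simp only [pvSegs, if_neg h, List.foldl_cons]
              have h0c : max (0 : Int) c = max c 0 := by omega
              rw [h0c, pvFoldlMax_pull, ← hsplit, pvSegs_run_skip k t d htk 0 le_rfl]
            have hIH := ih d 0 hdlen le_rfl (Or.inl rfl)
            have hlenL : pvLens k (ch :: rest) = pvLens k d := by
              simp [pvLens, hruns, if_neg h]
            rw [hstep, hIH, hlenL]
            have hnn := (PySem.List.le_foldl_max (pvLens k d) 0).1
            omega

-- ===== VERDICT (by name: the statement is the Claim_ definition above) =====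
theorem get_consective_items_spec : Claim_equal_get_consective_items := by
  intro items key _
  unfold Spec_get_consective_items get_consective_items get_consective_items_alt
  rw [pvALoop_spec]
  simp only [List.nil_append]
  rw [pvMaxD0 _ (pvSegs_nonneg _ _ 0 le_rfl)]
  rw [pvMain (PySem.Int.toChars key) (PySem.Int.toChars items).length
      (PySem.Int.toChars items) 0 le_rfl le_rfl (Or.inl rfl)]
  show _ = PySem.List.maxD (pvLens (PySem.Int.toChars key) (PySem.Int.toChars items)) (fun x => x) 0
  rw [PySem.List.maxD, pvMaxD0 _ (pvLens_nonneg _ _)]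
  have hnn := (PySem.List.le_foldl_max (pvLens (PySem.Int.toChars key) (PySem.Int.toChars items)) 0).1
  omega
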